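-- pv_equiv track=rewrite | github.com/WAI-bijetk/naver_opentalk_crawling | naver_opentalk_crawling.py | fill_none
-- ===== SOURCE A (Python) =====
-- def fill_none(temp_list):
--     # 닉네임이 None인 경우, 그 이전에 닉네임이 있는곳 까지 가서 닉네임으로 none값 교체
--     i = 0
--     while i < len(temp_list)-1:
--         if temp_list[i][1] is None:
--             j = i + 1
--             while j < len(temp_list) and temp_list[j][1] is None:
--                 j += 1
--             if j < len(temp_list):
--                 nickname = temp_list[j][1]
--                 temp_list[i][1] = nickname
--         i += 1
--     return temp_list
-- ===== SOURCE B (Python) =====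
-- def fill_none(temp_list):
--     # Single backward pass: carry the nearest following non-None nickname.
--     carry = None
--     for row in reversed(temp_list):
--         if row[1] is None:
--             if carry is not None:
--                 row[1] = carry
--         else:
--             carry = row[1]
--     return temp_list
-- ===== Notes on version B (the rewrite author's own statement) =====
-- stated objective: alternative
-- what changed: Replaced the forward index loop that rescans ahead for each None nickname by a single backward pass that carries the nearest following non-None nickname.
-- outside the precondition, e.g. on fill_none([['a', 'b'], ['c']]): A returns [['a', 'b'], ['c']], B raises IndexError; on fill_none([['a']]): A returns [['a']], B raises IndexError
import Mathlib
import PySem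

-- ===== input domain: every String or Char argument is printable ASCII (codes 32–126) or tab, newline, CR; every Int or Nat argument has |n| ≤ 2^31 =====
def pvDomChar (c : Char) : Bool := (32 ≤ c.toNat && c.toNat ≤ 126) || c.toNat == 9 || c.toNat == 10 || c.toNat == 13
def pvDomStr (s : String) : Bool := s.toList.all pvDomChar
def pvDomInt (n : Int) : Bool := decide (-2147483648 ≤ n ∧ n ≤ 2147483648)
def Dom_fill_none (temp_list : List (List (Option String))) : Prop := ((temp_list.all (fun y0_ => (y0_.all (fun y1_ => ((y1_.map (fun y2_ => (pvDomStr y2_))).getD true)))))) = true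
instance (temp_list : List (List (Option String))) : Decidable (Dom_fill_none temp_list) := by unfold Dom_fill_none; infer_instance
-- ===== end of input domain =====

-- B replaces A's forward loop (which rescans ahead for each None nickname) by one
-- backward pass carrying the nearest following non-None nickname (objective: alternative).
-- Both Pythons mutate temp_list's rows in place; on Pre_ the mutations coincide and the
-- equivalence proved here is about the returned value.

-- ===== PORT A =====
-- inner while: j scans forward past None nicknames
def fillJ (lst : List (List (Option String))) (j : Nat) : Nat :=
  if _h : j < lst.length then
    match PySem.List.pyGet? lst (j : Int) with
    | some rj =>
      match PySem.List.pyGet? rj 1 with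
      | some none => fillJ lst (j + 1)
      | _ => j
    | none => j           -- Python raises here (row shorter than 2); outside Pre_
  else j
termination_by lst.length - j

-- outer while over index i; fuel = lst.length is enough for the i < len-1 loop
def fillA : Nat → List (List (Option String)) → Nat → List (List (Option String))
  | 0, lst, _ => lst
  | fuel + 1, lst, i =>
    if (i : Int) < (lst.length : Int) - 1 then
      let lst' :=
        match PySem.List.pyGet? lst (i : Int) with
        | some row =>
          match PySem.List.pyGet? row 1 with
          | some none =>
            let j := fillJ lst (i + 1)
            if j < lst.length then
              match PySem.List.pyGet? lst (j : Int) with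
              | some rj =>
                match PySem.List.pyGet? rj 1 with
                | some nick => lst.set i (row.set 1 nick)
                | none => lst   -- Python raises; outside Pre_
              | none => lst
            else lst
          | some (some _) => lst
          | none => lst         -- Python raises; outside Pre_
        | none => lst
      fillA fuel lst' (i + 1)
    else lst

def fill_none (temp_list : List (List (Option String))) : List (List (Option String)) :=
  fillA temp_list.length temp_list 0

-- ===== PORT B =====
-- backward pass: processes the tail first, returning (carry, rewritten rows)
def fillB : List (List (Option String)) → Option String × List (List (Option String))
  | [] => (none, [])
  | row :: rest =>
    let (carry, rest') := fillB rest
    match PySem.List.pyGet? row 1 with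
    | some none =>
      match carry with
      | some c => (carry, row.set 1 (some c) :: rest')
      | none => (carry, row :: rest')
    | some (some s) => (some s, row :: rest')
    | none => (carry, row :: rest')   -- Python raises here; outside Pre_

def fill_none_alt (temp_list : List (List (Option String))) : List (List (Option String)) :=
  (fillB temp_list).2

-- ===== PRECONDITION & SPEC =====
-- Pre_ requires every row to have at least 2 entries.
-- A raises IndexError on a short row it reaches; it can return with a short LAST row
-- (never inspected), where B itself raises IndexError — those inputs are excluded too.
def Pre_fill_none (temp_list : List (List (Option String))) : Prop :=
  ∀ row ∈ temp_list, 2 ≤ row.length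
instance (temp_list : List (List (Option String))) : Decidable (Pre_fill_none temp_list) := by
  unfold Pre_fill_none; infer_instance

def pvWitness_fill_none : List (List (Option String)) :=
  [[some "a", none], [some "b", some "nick"]]

def Spec_fill_none (temp_list : List (List (Option String))) (out : List (List (Option String))) : Prop := out = fill_none_alt temp_list
instance (temp_list : List (List (Option String))) (out : List (List (Option String))) : Decidable (Spec_fill_none temp_list out) := by unfold Spec_fill_none; infer_instance

-- ===== CLAIM (what is proved, stated in full; the proofs are below) =====
def Claim_equal_fill_none : Prop := ∀ (temp_list : List (List (Option String))), Dom_fill_none temp_list → Pre_fill_none temp_list → Spec_fill_none temp_list (fill_none temp_list)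

-- ===== LEMMAS AND PROOFS =====

-- the first non-None nickname (entry [1]) in a list of rows
def fNick : List (List (Option String)) → Option String
  | [] => none
  | r :: rs =>
    match PySem.List.pyGet? r 1 with
    | some (some s) => some s
    | _ => fNick rs

def fRow (row : List (Option String)) (c : Option String) : List (Option String) :=
  match PySem.List.pyGet? row 1 with
  | some none => (match c with | some s => row.set 1 (some s) | none => row)
  | _ => row

def fillSpec : List (List (Option String)) → List (List (Option String))
  | [] => []
  | r :: rs => fRow r (fNick rs) :: fillSpec rs

lemma pyGet1 (r : List (Option String)) (h : 2 ≤ r.length) :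
    ∃ v, PySem.List.pyGet? r 1 = some v := by
  match r, h with
  | a :: b :: t, _ => exact ⟨b, by simp [PySem.List.pyGet?, PySem.List.pyIdx?]⟩

lemma fRow_none (row : List (Option String)) : fRow row none = row := by
  unfold fRow
  rcases hv : PySem.List.pyGet? row 1 with _ | (_ | s) <;> simp

lemma fillB_eq : ∀ l, fillB l = (fNick l, fillSpec l) := by
  intro l
  induction l with
  | nil => simp [fillB, fNick, fillSpec]
  | cons row rest ih =>
    rw [fillB, ih]
    rcases hv : PySem.List.pyGet? row 1 with _ | (_ | s) <;>
      simp [fNick, fillSpec, fRow, hv] <;> cases h : fNick rest <;> simp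

lemma set_append_length (pre : List (List (Option String))) (x v : List (Option String))
    (rest : List (List (Option String))) :
    (pre ++ x :: rest).set pre.length v = pre ++ v :: rest := by
  induction pre with
  | nil => simp
  | cons p ps ih => simp [ih]

lemma fillJ_spec : ∀ (suf pre : List (List (Option String))),
    (∀ r ∈ suf, 2 ≤ r.length) →
    (fNick suf = none → fillJ (pre ++ suf) pre.length = (pre ++ suf).length) ∧
    (∀ s, fNick suf = some s → ∃ rj,
        fillJ (pre ++ suf) pre.length < (pre ++ suf).length ∧
        PySem.List.pyGet? (pre ++ suf) (fillJ (pre ++ suf) pre.length : Int) = some rj ∧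
        PySem.List.pyGet? rj 1 = some (some s)) := by
  intro suf
  induction suf with
  | nil =>
    intro pre _
    constructor
    · intro _; rw [fillJ]; simp
    · intro s hs; simp [fNick] at hs
  | cons r rs ih =>
    intro pre hlen
    have hr2 : 2 ≤ r.length := hlen r (by simp)
    obtain ⟨v, hv⟩ := pyGet1 r hr2
    have hlt : pre.length < (pre ++ r :: rs).length := by simp
    have hget : PySem.List.pyGet? (pre ++ r :: rs) (pre.length : Int) = some r :=
      PySem.List.pyGet?_append_length ..
    have hstep : fillJ (pre ++ r :: rs) pre.length =
        (match PySem.List.pyGet? r 1 with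
         | some none => fillJ (pre ++ r :: rs) (pre.length + 1)
         | _ => pre.length) := by
      rw [fillJ]; simp only [hlt, dite_true, hget]
    have hassoc : pre ++ r :: rs = (pre ++ [r]) ++ rs := by simp
    have hlen1 : pre.length + 1 = (pre ++ [r]).length := by simp
    have ihh := ih (pre ++ [r]) (fun x hx => hlen x (by simp [hx]))
    cases v with
    | none =>
      -- scan continues
      have hfix : fillJ (pre ++ r :: rs) pre.length = fillJ ((pre ++ [r]) ++ rs) (pre ++ [r]).length := by
        rw [hstep, hv, hlen1, hassoc]
      have hnick : fNick (r :: rs) = fNick rs := by simp [fNick, hv]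
      constructor
      · intro h0
        rw [hfix, ihh.1 (by rw [← hnick]; exact h0)]
        simp
      · intro s hs
        obtain ⟨rj, h1, h2, h3⟩ := ihh.2 s (by rw [← hnick]; exact hs)
        refine ⟨rj, ?_, ?_, h3⟩ <;> rw [hfix] <;> [skip; rw [hassoc]]
        · calc fillJ ((pre ++ [r]) ++ rs) (pre ++ [r]).length < ((pre ++ [r]) ++ rs).length := h1
            _ = (pre ++ r :: rs).length := by simp
        · exact h2
    | some s0 =>
      have hfix : fillJ (pre ++ r :: rs) pre.length = pre.length := by rw [hstep, hv]
      have hnick : fNick (r :: rs) = some s0 := by simp [fNick, hv]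
      constructor
      · intro h0; rw [hnick] at h0; cases h0
      · intro s hs
        rw [hnick] at hs; cases hs
        exact ⟨r, by rw [hfix]; exact hlt, by rw [hfix]; exact hget, hv⟩

lemma fillA_eq : ∀ (suf pre : List (List (Option String))) (fuel : Nat),
    suf.length ≤ fuel → (∀ r ∈ suf, 2 ≤ r.length) →
    fillA fuel (pre ++ suf) pre.length = pre ++ fillSpec suf := by
  intro suf
  induction suf with
  | nil =>
    intro pre fuel _ _
    cases fuel with
    | zero => simp [fillA, fillSpec]
    | succ f => rw [fillA]; simp [fillSpec]
  | cons row rest ih =>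
    intro pre fuel hfuel hlen
    have hr2 : 2 ≤ row.length := hlen row (by simp)
    obtain ⟨v, hv⟩ := pyGet1 row hr2
    cases fuel with
    | zero => simp at hfuel
    | succ f =>
    have hget : PySem.List.pyGet? (pre ++ row :: rest) (pre.length : Int) = some row :=
      PySem.List.pyGet?_append_length ..
    have hrest2 : ∀ r ∈ rest, 2 ≤ r.length := fun x hx => hlen x (by simp [hx])
    have hf : rest.length ≤ f := by simp at hfuel; omega
    cases rest with
    | nil =>
      -- i = len-1: loop guard false, list returned unchanged
      rw [fillA]
      have hguard : ¬ ((pre.length : Int) < ((pre ++ [row]).length : Int) - 1) := by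
        simp
      rw [if_neg hguard]
      simp [fillSpec, fNick, fRow_none]
    | cons r0 rs =>
      have hguard : ((pre.length : Int) < ((pre ++ row :: r0 :: rs).length : Int) - 1) := by
        simp; omega
      rw [fillA, if_pos hguard]
      simp only [hget]
      have hassoc1 : ∀ v' : List (Option String), pre ++ v' :: r0 :: rs = (pre ++ [v']) ++ (r0 :: rs) := by
        intro v'; simp
      have hlen1 : ∀ v' : List (Option String), pre.length + 1 = (pre ++ [v']).length := by
        intro v'; simp
      cases v with
      | some s =>
        -- nickname present: no fill
        simp only [hv]
        rw [hassoc1 row, hlen1 row, ih (pre ++ [row]) f hf hrest2]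
        simp [fillSpec, fRow, hv]
      | none =>
        simp only [hv]
        have hspec := fillJ_spec (r0 :: rs) (pre ++ [row]) hrest2
        have hJfix : fillJ (pre ++ row :: r0 :: rs) (pre.length + 1) =
            fillJ ((pre ++ [row]) ++ (r0 :: rs)) (pre ++ [row]).length := by
          rw [hassoc1 row, hlen1 row]
        cases hn : fNick (r0 :: rs) with
        | none =>
          have hJ : fillJ (pre ++ row :: r0 :: rs) (pre.length + 1) = (pre ++ row :: r0 :: rs).length := by
            rw [hJfix, hspec.1 hn]; simp
          rw [hJ]
          simp only [lt_irrefl, if_false]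
          rw [hassoc1 row, hlen1 row, ih (pre ++ [row]) f hf hrest2]
          simp [fillSpec, fRow, hv, hn]
        | some s =>
          obtain ⟨rj, h1, h2, h3⟩ := hspec.2 s hn
          have e1 : fillJ (pre ++ row :: r0 :: rs) (pre.length + 1) <
              (pre ++ row :: r0 :: rs).length := by
            rw [hJfix]; simpa using h1
          rw [if_pos e1]
          have e2 : PySem.List.pyGet? (pre ++ row :: r0 :: rs)
              ((fillJ (pre ++ row :: r0 :: rs) (pre.length + 1) : Nat) : Int) = some rj := by
            rw [hJfix]; rw [hassoc1 row] ; exact h2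
          simp only [e2, h3]
          rw [set_append_length]
          rw [hassoc1 (row.set 1 (some s)), hlen1 (row.set 1 (some s)),
            ih (pre ++ [row.set 1 (some s)]) f hf hrest2]
          simp [fillSpec, fRow, hv, hn]

-- ===== VERDICT (by name: the statement is the Claim_ definition above) =====
theorem fill_none_spec : Claim_equal_fill_none := by
  intro l _hd hpre
  unfold Spec_fill_none fill_none fill_none_alt
  rw [fillB_eq]
  have := fillA_eq l [] l.length (le_refl _) hpre
  simpa using this
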